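-- pv_equiv track=rewrite | github.com/blegloannec/CodeProblems | CodinGame/Creations/counting_squares_on_pegs/solution.py | square_count
-- ===== SOURCE A (Python) =====
-- def square_count(P):
--     N = len(P)
--     S = set(P)
--     cpt = 0
--     for i in range(N):
--         xi,yi = P[i]
--         for j in range(i+1,N):
--             xj,yj = P[j]
--             dx,dy = xi-xj,yi-yj
--             for nx,ny in [(-dy,dx),(dy,-dx)]:
--                 if (xi+nx,yi+ny) in S and (xj+nx,yj+ny) in S:
--                     cpt += 1
--     return cpt//4
-- ===== SOURCE B (Python) =====
-- def square_count(P):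
--     S = set(P)
--     N = len(P)
--     cpt = 0
--     for i in range(N):
--         x1, y1 = P[i]
--         for j in range(i + 1, N):
--             x2, y2 = P[j]
--             dx, dy = x1 - x2, y1 - y2
--             ax, ay = x1 + x2 - dy, y1 + y2 + dx
--             bx, by = x1 + x2 + dy, y1 + y2 - dx
--             if ax % 2 == 0 and ay % 2 == 0 \
--                and (ax // 2, ay // 2) in S and (bx // 2, by // 2) in S:
--                 cpt += 1
--     return cpt // 2
-- ===== Notes on version B (the rewrite author's own statement) =====
-- stated objective: alternative
-- what changed: B detects squares by treating each point pair as a diagonal (computing the two opposite corners by midpoint arithmetic with an evenness check and dividing the final count by 2) instead of A's edge-plus-two-normals test divided by 4, halving the membership lookups per pair.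
-- outside the precondition, e.g. on square_count([(0, 0), (0, 0), (0, 0), (1, 0), (1, 0), (1, 1), (0, 1)]): A returns 5, B returns 4
import Mathlib
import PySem

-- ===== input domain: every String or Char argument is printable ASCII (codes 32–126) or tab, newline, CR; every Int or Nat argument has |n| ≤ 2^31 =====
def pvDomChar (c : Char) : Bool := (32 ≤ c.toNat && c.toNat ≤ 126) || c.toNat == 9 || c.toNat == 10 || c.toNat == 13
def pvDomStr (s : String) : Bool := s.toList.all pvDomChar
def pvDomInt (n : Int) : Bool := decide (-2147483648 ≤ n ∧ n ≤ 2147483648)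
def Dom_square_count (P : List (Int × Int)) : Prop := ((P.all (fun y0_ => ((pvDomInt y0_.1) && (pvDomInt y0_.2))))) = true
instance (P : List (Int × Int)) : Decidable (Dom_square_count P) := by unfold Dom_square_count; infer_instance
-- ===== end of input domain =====

-- B counts each square via its two diagonals (opposite-corner midpoint arithmetic, count//2) instead of
-- A's edge-plus-two-normals test (count//4): an alternative detection rule, equal on duplicate-free peg lists.

-- ===== PORT A =====
def square_count (P : List (Int × Int)) : Int :=
  let N : Int := (P.length : Int)
  let S : PySem.Set (Int × Int) := PySem.Set.ofList P
  let cpt : Int :=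
    (PySem.List.pyRange 0 N 1).foldl (fun cpt i =>
      let p := PySem.List.pyGetD P i (0, 0)
      (PySem.List.pyRange (i + 1) N 1).foldl (fun cpt j =>
        let q := PySem.List.pyGetD P j (0, 0)
        let dx := p.1 - q.1
        let dy := p.2 - q.2
        ([(-dy, dx), (dy, -dx)] : List (Int × Int)).foldl (fun cpt n =>
          if PySem.Set.contains S (p.1 + n.1, p.2 + n.2) &&
             PySem.Set.contains S (q.1 + n.1, q.2 + n.2) then cpt + 1 else cpt) cpt) cpt) 0
  PySem.Int.floordiv cpt 4

-- ===== PORT B =====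
def square_count_alt (P : List (Int × Int)) : Int :=
  let S : PySem.Set (Int × Int) := PySem.Set.ofList P
  let N : Int := (P.length : Int)
  let cpt : Int :=
    (PySem.List.pyRange 0 N 1).foldl (fun cpt i =>
      let p := PySem.List.pyGetD P i (0, 0)
      (PySem.List.pyRange (i + 1) N 1).foldl (fun cpt j =>
        let q := PySem.List.pyGetD P j (0, 0)
        let dx := p.1 - q.1
        let dy := p.2 - q.2
        let ax := p.1 + q.1 - dy
        let ay := p.2 + q.2 + dx
        let bx := p.1 + q.1 + dy
        let by' := p.2 + q.2 - dx
        if PySem.Int.mod ax 2 == 0 && PySem.Int.mod ay 2 == 0 &&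
           PySem.Set.contains S (PySem.Int.floordiv ax 2, PySem.Int.floordiv ay 2) &&
           PySem.Set.contains S (PySem.Int.floordiv bx 2, PySem.Int.floordiv by' 2)
        then cpt + 1 else cpt) cpt) 0
  PySem.Int.floordiv cpt 2

-- ===== PRECONDITION & SPEC =====
-- Pre_ excludes lists with repeated points: on duplicated pegs A's edge-based count and B's
-- diagonal-based count weight the repeats differently, and either multiplicity rule is an
-- accident of the implementation for a task about a set of distinct pegs.
def Pre_square_count (P : List (Int × Int)) : Prop := P.Nodup
instance (P : List (Int × Int)) : Decidable (Pre_square_count P) := by unfold Pre_square_count; infer_instance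
def pvWitness_square_count : (List (Int × Int)) := [(0, 0), (1, 0), (1, 1), (0, 1)]
def Spec_square_count (P : List (Int × Int)) (out : Int) : Prop := out = square_count_alt P
instance (P : List (Int × Int)) (out : Int) : Decidable (Spec_square_count P out) := by unfold Spec_square_count; infer_instance

-- ===== CLAIM (what is proved, stated in full; the proofs are below) =====
def Claim_equal_square_count : Prop := ∀ (P : List (Int × Int)), Dom_square_count P → Pre_square_count P → Spec_square_count P (square_count P)

-- ===== LEMMAS AND PROOFS =====

-- A's test for the pair (u,v) with normal (-(u.2-v.2), u.1-v.1): both translated points are pegs.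
abbrev eProp (P : List (Int × Int)) (u v : Int × Int) : Prop :=
  (u.1 + -(u.2 - v.2), u.2 + (u.1 - v.1)) ∈ P ∧ (v.1 + -(u.2 - v.2), v.2 + (u.1 - v.1)) ∈ P

-- B's test for the pair (u,v) as a diagonal: both derived opposite corners are integral pegs.
abbrev dProp (P : List (Int × Int)) (u v : Int × Int) : Prop :=
  (u.1 + v.1 - (u.2 - v.2)) % 2 = 0 ∧ (u.2 + v.2 + (u.1 - v.1)) % 2 = 0 ∧
  ((u.1 + v.1 - (u.2 - v.2)) / 2, (u.2 + v.2 + (u.1 - v.1)) / 2) ∈ P ∧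
  ((u.1 + v.1 + (u.2 - v.2)) / 2, (u.2 + v.2 - (u.1 - v.1)) / 2) ∈ P

lemma memP {P : List (Int × Int)} {x' y' : Int} (x y : Int) (h : (x', y') ∈ P)
    (hx : x = x') (hy : y = y') : (x, y) ∈ P := by rw [hx, hy]; exact h

lemma memP' {P : List (Int × Int)} {v : Int × Int} (x y : Int) (h : v ∈ P)
    (hx : x = v.1) (hy : y = v.2) : (x, y) ∈ P := by rw [hx, hy]; exact h

lemma pairEq {v : Int × Int} {x y : Int} (hx : x = v.1) (hy : y = v.2) : (x, y) = v := by
  rw [hx, hy]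

def pairsSum (g : (Int × Int) → (Int × Int) → Int) : List (Int × Int) → Int
  | [] => 0
  | u :: t => (t.map (g u)).sum + pairsSum g t

lemma sum_pairs (g : (Int × Int) → (Int × Int) → Int) (xs : List (Int × Int)) :
    ((List.range xs.length).map
      (fun k => ((xs.drop (k + 1)).map (g (xs.getD k (0, 0)))).sum)).sum = pairsSum g xs := by
  induction xs with
  | nil => rfl
  | cons u t ih =>
    have htail : ∀ k, k ∈ List.range t.length →
        ((fun k => (List.map (g ((u :: t).getD k (0, 0))) (List.drop (k + 1) (u :: t))).sum) ∘ Nat.succ) k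
        = (fun k => (List.map (g (t.getD k (0, 0))) (List.drop (k + 1) t)).sum) k := fun k _ => rfl
    rw [List.length_cons, List.range_succ_eq_map, List.map_cons, List.sum_cons, List.map_map,
        List.map_congr_left htail, ih]
    rfl

lemma loop2 (xs : List (Int × Int)) (g : (Int × Int) → (Int × Int) → Int) (c : Int) :
    (PySem.List.pyRange 0 (xs.length : Int) 1).foldl (fun acc i =>
       (PySem.List.pyRange (i + 1) (xs.length : Int) 1).foldl (fun acc2 j =>
          acc2 + g (PySem.List.pyGetD xs i (0, 0)) (PySem.List.pyGetD xs j (0, 0))) acc) c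
    = c + pairsSum g xs := by
  rw [PySem.List.foldl_congr_mem _ _
        (fun acc i => acc + ((xs.drop (i + 1).toNat).map (g (PySem.List.pyGetD xs i (0, 0)))).sum) c ?_]
  · rw [PySem.List.foldl_add, ← sum_pairs g xs]
    congr 1
    rw [PySem.List.pyRange_one, List.map_map]
    have hlen : (((xs.length : Int)) - 0).toNat = xs.length := by omega
    rw [hlen]
    apply congrArg List.sum
    apply List.map_congr_left
    intro k _
    simp only [Function.comp_apply, zero_add]
    rw [show ((k : Int) + 1).toNat = k + 1 from by omega, PySem.List.pyGetD_natCast]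
  · intro acc i hi
    have h0 : (0 : Int) ≤ i + 1 := by
      have := (PySem.List.mem_pyRange_one.mp hi).1; omega
    rw [PySem.List.foldl_pyRange_pyGetD' xs (0, 0)
          (fun acc2 v => acc2 + g (PySem.List.pyGetD xs i (0, 0)) v) acc h0,
        PySem.List.foldl_add]

lemma innerA (P : List (Int × Int)) (c : Int) (p q : Int × Int) :
    ([(-(p.2 - q.2), p.1 - q.1), (p.2 - q.2, -(p.1 - q.1))] : List (Int × Int)).foldl
      (fun cpt n =>
        if PySem.Set.contains (PySem.Set.ofList P) (p.1 + n.1, p.2 + n.2) &&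
           PySem.Set.contains (PySem.Set.ofList P) (q.1 + n.1, q.2 + n.2) then cpt + 1 else cpt) c
    = c + ((if eProp P p q then (1 : Int) else 0) + (if eProp P q p then (1 : Int) else 0)) := by
  simp only [List.foldl, Bool.and_eq_true, PySem.Set.contains_iff, PySem.Set.mem_ofList]
  have h2 : ((p.1 + (p.2 - q.2), p.2 + -(p.1 - q.1)) ∈ P ∧ (q.1 + (p.2 - q.2), q.2 + -(p.1 - q.1)) ∈ P)
      ↔ eProp P q p := by
    constructor <;> rintro ⟨ha, hb⟩ <;>
      exact ⟨memP _ _ hb (by ring) (by ring), memP _ _ ha (by ring) (by ring)⟩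
  rw [if_congr h2 rfl rfl]
  split_ifs <;> omega

lemma innerB (P : List (Int × Int)) (c : Int) (p q : Int × Int) :
    (if PySem.Int.mod (p.1 + q.1 - (p.2 - q.2)) 2 == 0 && PySem.Int.mod (p.2 + q.2 + (p.1 - q.1)) 2 == 0 &&
        PySem.Set.contains (PySem.Set.ofList P)
          (PySem.Int.floordiv (p.1 + q.1 - (p.2 - q.2)) 2, PySem.Int.floordiv (p.2 + q.2 + (p.1 - q.1)) 2) &&
        PySem.Set.contains (PySem.Set.ofList P)
          (PySem.Int.floordiv (p.1 + q.1 + (p.2 - q.2)) 2, PySem.Int.floordiv (p.2 + q.2 - (p.1 - q.1)) 2)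
     then c + 1 else c)
    = c + (if dProp P p q then (1 : Int) else 0) := by
  have hpos : (0 : Int) < 2 := by norm_num
  simp only [PySem.Int.mod_eq_emod_of_pos hpos, PySem.Int.floordiv_eq_ediv_of_pos hpos,
    Bool.and_eq_true, beq_iff_eq, PySem.Set.contains_iff, PySem.Set.mem_ofList]
  have h2 : ((((p.1 + q.1 - (p.2 - q.2)) % 2 = 0 ∧ (p.2 + q.2 + (p.1 - q.1)) % 2 = 0) ∧
        ((p.1 + q.1 - (p.2 - q.2)) / 2, (p.2 + q.2 + (p.1 - q.1)) / 2) ∈ P) ∧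
        ((p.1 + q.1 + (p.2 - q.2)) / 2, (p.2 + q.2 - (p.1 - q.1)) / 2) ∈ P)
      ↔ dProp P p q := by
    constructor
    · rintro ⟨⟨⟨h1, h2⟩, h3⟩, h4⟩; exact ⟨h1, h2, h3, h4⟩
    · rintro ⟨h1, h2, h3, h4⟩; exact ⟨⟨⟨h1, h2⟩, h3⟩, h4⟩
  rw [if_congr h2 rfl rfl]
  split_ifs <;> omega

lemma portA_eq (P : List (Int × Int)) :
    square_count P = PySem.Int.floordiv
      (pairsSum (fun u v => (if eProp P u v then (1 : Int) else 0) + (if eProp P v u then (1 : Int) else 0)) P) 4 := by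
  rw [show square_count P = PySem.Int.floordiv
      ((PySem.List.pyRange 0 (P.length : Int) 1).foldl (fun cpt i =>
        (PySem.List.pyRange (i + 1) (P.length : Int) 1).foldl (fun cpt j =>
          ([(-((PySem.List.pyGetD P i (0, 0)).2 - (PySem.List.pyGetD P j (0, 0)).2),
              (PySem.List.pyGetD P i (0, 0)).1 - (PySem.List.pyGetD P j (0, 0)).1),
            ((PySem.List.pyGetD P i (0, 0)).2 - (PySem.List.pyGetD P j (0, 0)).2,
              -((PySem.List.pyGetD P i (0, 0)).1 - (PySem.List.pyGetD P j (0, 0)).1))] : List (Int × Int)).foldl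
            (fun cpt n =>
              if PySem.Set.contains (PySem.Set.ofList P)
                   ((PySem.List.pyGetD P i (0, 0)).1 + n.1, (PySem.List.pyGetD P i (0, 0)).2 + n.2) &&
                 PySem.Set.contains (PySem.Set.ofList P)
                   ((PySem.List.pyGetD P j (0, 0)).1 + n.1, (PySem.List.pyGetD P j (0, 0)).2 + n.2)
              then cpt + 1 else cpt) cpt) cpt) 0) 4 from rfl]
  congr 1
  refine (PySem.List.foldl_congr_mem _ _ _ 0 ?_).trans ((loop2 P _ 0).trans (zero_add _))
  intro acc i _
  refine PySem.List.foldl_congr_mem _ _ _ acc ?_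
  intro acc2 j _
  exact innerA P acc2 (PySem.List.pyGetD P i (0, 0)) (PySem.List.pyGetD P j (0, 0))

lemma portB_eq (P : List (Int × Int)) :
    square_count_alt P = PySem.Int.floordiv
      (pairsSum (fun u v => (if dProp P u v then (1 : Int) else 0)) P) 2 := by
  rw [show square_count_alt P = PySem.Int.floordiv
      ((PySem.List.pyRange 0 (P.length : Int) 1).foldl (fun cpt i =>
        (PySem.List.pyRange (i + 1) (P.length : Int) 1).foldl (fun cpt j =>
          if PySem.Int.mod ((PySem.List.pyGetD P i (0, 0)).1 + (PySem.List.pyGetD P j (0, 0)).1 -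
               ((PySem.List.pyGetD P i (0, 0)).2 - (PySem.List.pyGetD P j (0, 0)).2)) 2 == 0 &&
             PySem.Int.mod ((PySem.List.pyGetD P i (0, 0)).2 + (PySem.List.pyGetD P j (0, 0)).2 +
               ((PySem.List.pyGetD P i (0, 0)).1 - (PySem.List.pyGetD P j (0, 0)).1)) 2 == 0 &&
             PySem.Set.contains (PySem.Set.ofList P)
               (PySem.Int.floordiv ((PySem.List.pyGetD P i (0, 0)).1 + (PySem.List.pyGetD P j (0, 0)).1 -
                  ((PySem.List.pyGetD P i (0, 0)).2 - (PySem.List.pyGetD P j (0, 0)).2)) 2,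
                PySem.Int.floordiv ((PySem.List.pyGetD P i (0, 0)).2 + (PySem.List.pyGetD P j (0, 0)).2 +
                  ((PySem.List.pyGetD P i (0, 0)).1 - (PySem.List.pyGetD P j (0, 0)).1)) 2) &&
             PySem.Set.contains (PySem.Set.ofList P)
               (PySem.Int.floordiv ((PySem.List.pyGetD P i (0, 0)).1 + (PySem.List.pyGetD P j (0, 0)).1 +
                  ((PySem.List.pyGetD P i (0, 0)).2 - (PySem.List.pyGetD P j (0, 0)).2)) 2,
                PySem.Int.floordiv ((PySem.List.pyGetD P i (0, 0)).2 + (PySem.List.pyGetD P j (0, 0)).2 -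
                  ((PySem.List.pyGetD P i (0, 0)).1 - (PySem.List.pyGetD P j (0, 0)).1)) 2)
          then cpt + 1 else cpt) cpt) 0) 2 from rfl]
  congr 1
  refine (PySem.List.foldl_congr_mem _ _ _ 0 ?_).trans ((loop2 P _ 0).trans (zero_add _))
  intro acc i _
  refine PySem.List.foldl_congr_mem _ _ _ acc ?_
  intro acc2 j _
  exact innerB P acc2 (PySem.List.pyGetD P i (0, 0)) (PySem.List.pyGetD P j (0, 0))

lemma pairsSum_double (e : (Int × Int) → (Int × Int) → Prop) [∀ u v, Decidable (e u v)]
    (P : List (Int × Int)) (h : P.Nodup) :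
    pairsSum (fun u v => (if e u v then (1 : Int) else 0) + (if e v u then (1 : Int) else 0)) P
    = ∑ x ∈ P.toFinset, ∑ y ∈ P.toFinset, (if x ≠ y ∧ e x y then (1 : Int) else 0) := by
  induction P with
  | nil => simp [pairsSum]
  | cons u t ih =>
    obtain ⟨hu, ht⟩ := List.nodup_cons.mp h
    have hunotin : u ∉ t.toFinset := by simpa
    rw [List.toFinset_cons, Finset.sum_insert hunotin]
    have e2 : ∀ x : Int × Int, (∑ y ∈ insert u t.toFinset, (if x ≠ y ∧ e x y then (1 : Int) else 0))
        = (if x ≠ u ∧ e x u then (1 : Int) else 0) + ∑ y ∈ t.toFinset, (if x ≠ y ∧ e x y then (1 : Int) else 0) :=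
      fun x => Finset.sum_insert hunotin
    rw [e2 u, if_neg (show ¬(u ≠ u ∧ e u u) from fun hc => hc.1 rfl), zero_add]
    rw [Finset.sum_congr rfl (fun x _ => e2 x), Finset.sum_add_distrib, ← ih ht]
    simp only [pairsSum]
    have key1 : (t.map (fun v => (if e u v then (1 : Int) else 0))).sum
        = ∑ y ∈ t.toFinset, (if u ≠ y ∧ e u y then (1 : Int) else 0) := by
      rw [List.sum_toFinset (fun y => if u ≠ y ∧ e u y then (1 : Int) else 0) ht]
      apply congrArg List.sum
      apply List.map_congr_left
      intro y hy
      have hne : u ≠ y := fun h' => hu (h' ▸ hy)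
      simp [hne]
    have key2 : (t.map (fun v => (if e v u then (1 : Int) else 0))).sum
        = ∑ x ∈ t.toFinset, (if x ≠ u ∧ e x u then (1 : Int) else 0) := by
      rw [List.sum_toFinset (fun x => if x ≠ u ∧ e x u then (1 : Int) else 0) ht]
      apply congrArg List.sum
      apply List.map_congr_left
      intro y hy
      have hne : y ≠ u := fun h' => hu (h' ▸ hy)
      simp [hne]
    rw [PySem.List.sum_map_add_int, key1, key2]
    ring

lemma pairsSum_single (d : (Int × Int) → (Int × Int) → Prop) [∀ u v, Decidable (d u v)]
    (hsymm : ∀ u v, d u v ↔ d v u) (P : List (Int × Int)) (h : P.Nodup) :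
    2 * pairsSum (fun u v => (if d u v then (1 : Int) else 0)) P
    = ∑ x ∈ P.toFinset, ∑ y ∈ P.toFinset, (if x ≠ y ∧ d x y then (1 : Int) else 0) := by
  induction P with
  | nil => simp [pairsSum]
  | cons u t ih =>
    obtain ⟨hu, ht⟩ := List.nodup_cons.mp h
    have hunotin : u ∉ t.toFinset := by simpa
    rw [List.toFinset_cons, Finset.sum_insert hunotin]
    have e2 : ∀ x : Int × Int, (∑ y ∈ insert u t.toFinset, (if x ≠ y ∧ d x y then (1 : Int) else 0))
        = (if x ≠ u ∧ d x u then (1 : Int) else 0) + ∑ y ∈ t.toFinset, (if x ≠ y ∧ d x y then (1 : Int) else 0) :=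
      fun x => Finset.sum_insert hunotin
    rw [e2 u, if_neg (show ¬(u ≠ u ∧ d u u) from fun hc => hc.1 rfl), zero_add]
    rw [Finset.sum_congr rfl (fun x _ => e2 x), Finset.sum_add_distrib, ← ih ht]
    simp only [pairsSum]
    have key1 : (t.map (fun v => (if d u v then (1 : Int) else 0))).sum
        = ∑ y ∈ t.toFinset, (if u ≠ y ∧ d u y then (1 : Int) else 0) := by
      rw [List.sum_toFinset (fun y => if u ≠ y ∧ d u y then (1 : Int) else 0) ht]
      apply congrArg List.sum
      apply List.map_congr_left
      intro y hy
      have hne : u ≠ y := fun h' => hu (h' ▸ hy)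
      simp [hne]
    have key2 : (t.map (fun v => (if d u v then (1 : Int) else 0))).sum
        = ∑ x ∈ t.toFinset, (if x ≠ u ∧ d x u then (1 : Int) else 0) := by
      rw [List.sum_toFinset (fun x => if x ≠ u ∧ d x u then (1 : Int) else 0) ht]
      apply congrArg List.sum
      apply List.map_congr_left
      intro y hy
      have hne : y ≠ u := fun h' => hu (h' ▸ hy)
      have hs := hsymm u y
      simp [hne, hs]
    linarith [key1, key2]

lemma dProp_symm (P : List (Int × Int)) (u v : Int × Int) : dProp P u v ↔ dProp P v u := by
  constructor
  · rintro ⟨h1, h2, h3, h4⟩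
    exact ⟨by omega, by omega, memP _ _ h4 (by omega) (by omega), memP _ _ h3 (by omega) (by omega)⟩
  · rintro ⟨h1, h2, h3, h4⟩
    exact ⟨by omega, by omega, memP _ _ h4 (by omega) (by omega), memP _ _ h3 (by omega) (by omega)⟩

lemma sum_e_eq_sum_d (P : List (Int × Int)) :
    (∑ x ∈ P.toFinset, ∑ y ∈ P.toFinset, (if x ≠ y ∧ eProp P x y then (1 : Int) else 0))
    = ∑ x ∈ P.toFinset, ∑ y ∈ P.toFinset, (if x ≠ y ∧ dProp P x y then (1 : Int) else 0) := by
  rw [← Finset.sum_product' (f := fun x y => if x ≠ y ∧ eProp P x y then (1 : Int) else 0)]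
  rw [← Finset.sum_product' (f := fun x y => if x ≠ y ∧ dProp P x y then (1 : Int) else 0)]
  rw [Finset.sum_boole, Finset.sum_boole]
  congr 1
  refine Finset.card_bij'
    (fun w _ => (w.1, (w.2.1 + -(w.1.2 - w.2.2), w.2.2 + (w.1.1 - w.2.1))))
    (fun w _ => (w.1, ((w.1.1 + w.2.1 + (w.1.2 - w.2.2)) / 2, (w.1.2 + w.2.2 - (w.1.1 - w.2.1)) / 2)))
    ?hi ?hj ?li ?ri
  case hi =>
    intro w hw
    obtain ⟨hmem, hne, he1, he2⟩ := Finset.mem_filter.mp hw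
    obtain ⟨huT, hvT⟩ := Finset.mem_product.mp hmem
    have hvP := List.mem_toFinset.mp hvT
    rw [Finset.mem_filter, Finset.mem_product]
    dsimp only
    refine ⟨⟨huT, List.mem_toFinset.mpr he2⟩, ?_, by omega, by omega, ?_, ?_⟩
    · intro hEq
      obtain ⟨h1, h2⟩ := Prod.ext_iff.mp hEq
      dsimp only at h1 h2
      exact hne (Prod.ext_iff.mpr ⟨by omega, by omega⟩)
    · exact memP _ _ he1 (by omega) (by omega)
    · exact memP' _ _ hvP (by omega) (by omega)
  case hj =>
    intro w hw
    obtain ⟨hmem, hne, hp1, hp2, hm1, hm2⟩ := Finset.mem_filter.mp hw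
    obtain ⟨haT, hcT⟩ := Finset.mem_product.mp hmem
    have hcP := List.mem_toFinset.mp hcT
    have hnec : ¬(w.1.1 = w.2.1 ∧ w.1.2 = w.2.2) := fun hh => hne (Prod.ext_iff.mpr hh)
    rw [Finset.mem_filter, Finset.mem_product]
    dsimp only
    refine ⟨⟨haT, List.mem_toFinset.mpr hm2⟩, ?_, ?_, ?_⟩
    · intro hEq
      obtain ⟨h1, h2⟩ := Prod.ext_iff.mp hEq
      dsimp only at h1 h2
      omega
    · exact memP _ _ hm1 (by omega) (by omega)
    · exact memP' _ _ hcP (by omega) (by omega)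
  case li =>
    intro w hw
    dsimp only
    refine Prod.ext_iff.mpr ⟨rfl, ?_⟩
    dsimp only
    exact pairEq (by omega) (by omega)
  case ri =>
    intro w hw
    obtain ⟨hmem, hne, hp1, hp2, hm1, hm2⟩ := Finset.mem_filter.mp hw
    dsimp only
    refine Prod.ext_iff.mpr ⟨rfl, ?_⟩
    dsimp only
    exact pairEq (by omega) (by omega)

-- ===== VERDICT (by name: the statement is the Claim_ definition above) =====
theorem square_count_spec : Claim_equal_square_count := by
  intro P _ hpre
  unfold Spec_square_count
  have hd := pairsSum_single (dProp P) (dProp_symm P) P hpre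
  rw [portA_eq, portB_eq, pairsSum_double (eProp P) P hpre, sum_e_eq_sum_d, ← hd]
  rw [PySem.Int.floordiv_eq_ediv_of_pos (by norm_num : (0:Int) < 4),
      PySem.Int.floordiv_eq_ediv_of_pos (by norm_num : (0:Int) < 2)]
  omega
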